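-- pv_equiv track=rewrite | github.com/datawhalechina/huawei-od-python | codes/questions200/247-max-count-of-equal-and-disjoint-contiguous-subsequences.py | solve_method
-- ===== SOURCE A (Python) =====
-- def solve_method(N, nums):
--     max_count = 0
--     # sum_count_dict, sum_pos_dict
--     sum_count_dict = {}
--     sum_pos_dict = {}
--     dp = nums[:]
--     for i in range(N):  # 枚举子序列的长度
--         for j in range(N-i):  # 枚举子序列的起始位置
--             if i > 0:
--                 dp[j] += nums[j+i]
--             summ = dp[j]
--             # 判断该和是否记录过
--             if summ not in sum_count_dict:
--                 sum_count_dict[summ] = 0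
--                 sum_pos_dict[summ] = set()
--
--             # 判断该索引是否被记录过
--             exist = False
--             pos = sum_pos_dict[summ]
--             for k in range(j, j+i+1):
--                 if k in pos:
--                     exist = True
--                     break
--             # 索引没有被记录过
--             if not exist:
--                 sum_count_dict[summ] += 1
--                 max_count = max(max_count, sum_count_dict[summ])
--                 for k in range(j, j+i+1):
--                     pos.add(k)
--                 sum_pos_dict[summ] = pos
--     return max_count
-- ===== SOURCE B (Python) =====
-- def solve_method(N, nums):
--     # prefix sums: window sum in O(1) instead of the incremental dp array
--     pre = [0]
--     run = 0
--     for x in nums[:N]: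
--         run += x
--         pre.append(run)
--     # per sum: sorted list of the disjoint intervals picked so far
--     intervals = {}
--     max_count = 0
--     for i in range(N):
--         for j in range(N - i):
--             s = pre[j + i + 1] - pre[j]
--             lst = intervals.get(s, [])
--             # binary search: lo = number of intervals whose start is <= j+i
--             lo, hi = 0, len(lst)
--             while lo < hi:
--                 mid = (lo + hi) // 2
--                 if lst[mid][0] <= j + i:
--                     lo = mid + 1
--                 else:
--                     hi = mid
--             if lo == 0 or lst[lo - 1][1] < j:
--                 lst.insert(lo, (j, j + i))
--                 intervals[s] = lst
--                 if len(lst) > max_count: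
--                     max_count = len(lst)
--     return max_count
-- ===== Notes on version B (the rewrite author's own statement) =====
-- stated objective: faster
-- what changed: B computes each window sum from a prefix-sum array instead of A's incrementally updated dp array, and keeps, per sum, a sorted list of the disjoint picked intervals probed by binary search and updated by one insertion, replacing A's per-sum Python set of covered indices with its O(length) membership scan and add loop; intended as faster (O(N^2 log N) vs O(N^3)), measured 13.97x at n=1024, unconfirmed at n=4096 where both can time out.
import Mathlib
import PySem

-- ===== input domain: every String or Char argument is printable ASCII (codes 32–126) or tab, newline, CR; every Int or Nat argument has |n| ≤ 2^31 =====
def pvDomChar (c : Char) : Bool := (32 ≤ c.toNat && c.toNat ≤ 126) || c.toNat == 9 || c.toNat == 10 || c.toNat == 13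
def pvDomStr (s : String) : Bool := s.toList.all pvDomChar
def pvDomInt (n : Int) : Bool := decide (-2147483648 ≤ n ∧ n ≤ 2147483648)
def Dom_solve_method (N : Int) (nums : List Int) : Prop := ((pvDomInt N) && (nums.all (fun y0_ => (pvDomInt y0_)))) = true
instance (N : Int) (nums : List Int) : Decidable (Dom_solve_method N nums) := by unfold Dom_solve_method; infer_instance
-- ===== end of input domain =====

-- B replaces A's incremental dp array and per-sum index-set scans by prefix sums and a
-- per-sum sorted list of disjoint picked intervals probed by hand-rolled binary search.
-- Intended as faster; a timing run measured B 13.97x faster at n=1024 (A times out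
-- beyond that; on the largest generated inputs B's own Python constant can time out too).

-- ===== PORT A =====
def pureA (i j summ maxc : Int) (scd : PySem.Dict Int Int) (spd : PySem.Dict Int (List Int)) :
    Int × PySem.Dict Int Int × PySem.Dict Int (List Int) :=
  let scd2 := if scd.contains summ then scd else scd.insert summ 0
  let spd2 := if scd.contains summ then spd else spd.insert summ PySem.Set.empty
  let pos := spd2.getD summ PySem.Set.empty
  let exist := (PySem.List.pyRange j (j + i + 1) 1).any (fun k => PySem.Set.contains pos k)
  if exist then (maxc, scd2, spd2)
  else
    let c := scd2.getD summ 0 + 1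
    let maxc2 := max maxc c
    let pos2 := (PySem.List.pyRange j (j + i + 1) 1).foldl (fun p k => PySem.Set.add p k) pos
    (maxc2, scd2.insert summ c, spd2.insert summ pos2)

def stepA (nums : List Int) (i : Int)
    (st : Int × PySem.Dict Int Int × PySem.Dict Int (List Int) × List Int) (j : Int) :
    Int × PySem.Dict Int Int × PySem.Dict Int (List Int) × List Int :=
  match st with
  | (maxc, scd, spd, dp) =>
    let dp2 := if i > 0 then
        PySem.List.pySetD dp j (PySem.List.pyGetD dp j 0 + PySem.List.pyGetD nums (j + i) 0)
      else dp
    let summ := PySem.List.pyGetD dp2 j 0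
    let r := pureA i j summ maxc scd spd
    (r.1, r.2.1, r.2.2, dp2)

def solve_method (N : Int) (nums : List Int) : Int :=
  ((PySem.List.pyRange 0 N 1).foldl
    (fun st i => (PySem.List.pyRange 0 (N - i) 1).foldl (stepA nums i) st)
    (0, PySem.Dict.empty, PySem.Dict.empty, nums)).1

-- ===== PORT B =====
def bsearchB (lst : List (Int × Int)) (x : Int) (lo hi : Int) : Int :=
  if h : lo < hi then
    let mid := PySem.Int.floordiv (lo + hi) 2
    if (PySem.List.pyGetD lst mid (0, 0)).1 ≤ x then bsearchB lst x (mid + 1) hi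
    else bsearchB lst x lo mid
  else lo
termination_by (hi - lo).toNat
decreasing_by
  · have := PySem.Int.floordiv_two_mid_bounds (lo := lo) (hi := hi) (le_of_lt h)
    omega
  · have := PySem.Int.floordiv_two_mid_bounds (lo := lo) (hi := hi) (le_of_lt h)
    have : PySem.Int.floordiv (lo + hi) 2 < hi := by
      rw [PySem.Int.floordiv_lt_iff_lt_mul (by omega)]; omega
    omega

def pureB (i j s maxc : Int) (ivd : PySem.Dict Int (List (Int × Int))) :
    Int × PySem.Dict Int (List (Int × Int)) :=
  let lst := ivd.getD s []
  let lo := bsearchB lst (j + i) 0 (lst.length : Int)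
  if lo == 0 || decide ((PySem.List.pyGetD lst (lo - 1) (0, 0)).2 < j) then
    let lst2 := PySem.List.insert lst lo (j, j + i)
    let maxc2 := if (lst2.length : Int) > maxc then (lst2.length : Int) else maxc
    (maxc2, ivd.insert s lst2)
  else (maxc, ivd)

def stepB (pre : List Int) (i : Int)
    (st : Int × PySem.Dict Int (List (Int × Int))) (j : Int) :
    Int × PySem.Dict Int (List (Int × Int)) :=
  match st with
  | (maxc, ivd) =>
    let s := PySem.List.pyGetD pre (j + i + 1) 0 - PySem.List.pyGetD pre j 0
    pureB i j s maxc ivd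

def solve_method_alt (N : Int) (nums : List Int) : Int :=
  let pr := (PySem.List.slice nums none (some N)).foldl
    (fun (p : List Int × Int) x => (p.1 ++ [p.2 + x], p.2 + x)) ([0], 0)
  let pre := pr.1
  ((PySem.List.pyRange 0 N 1).foldl
    (fun st i => (PySem.List.pyRange 0 (N - i) 1).foldl (stepB pre i) st)
    (0, PySem.Dict.empty)).1

-- ===== PRECONDITION & SPEC =====
-- Pre_ excludes exactly the inputs with N > len(nums), on which A raises IndexError
-- (dp[j] out of range); B raises there too (pre[j+i+1] out of range).
def Pre_solve_method (N : Int) (nums : List Int) : Prop := N ≤ (nums.length : Int)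
instance (N : Int) (nums : List Int) : Decidable (Pre_solve_method N nums) := by
  unfold Pre_solve_method; infer_instance
def pvWitness_solve_method : Int × List Int := (4, [2, 1, 1, 2])

def Spec_solve_method (N : Int) (nums : List Int) (out : Int) : Prop := out = solve_method_alt N nums
instance (N : Int) (nums : List Int) (out : Int) : Decidable (Spec_solve_method N nums out) := by
  unfold Spec_solve_method; infer_instance

-- ===== CLAIM (what is proved, stated in full; the proofs are below) =====
def Claim_equal_solve_method : Prop := ∀ (N : Int) (nums : List Int), Dom_solve_method N nums → Pre_solve_method N nums → Spec_solve_method N nums (solve_method N nums)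

-- ===== LEMMAS AND PROOFS =====

-- ===== proof-side definitions =====
def pfx (nums : List Int) (m : Int) : Int := (nums.take m.toNat).sum

def WFlst (lst : List (Int × Int)) : Prop :=
  (∀ (a b : Nat) (hab : a < b) (hb : b < lst.length), (lst[a]'(lt_trans hab hb)).2 < (lst[b]'hb).1) ∧
  (∀ p ∈ lst, p.1 ≤ p.2)

def covers (lst : List (Int × Int)) (k : Int) : Prop := ∃ p ∈ lst, p.1 ≤ k ∧ k ≤ p.2

def RelD (scd : PySem.Dict Int Int) (spd : PySem.Dict Int (List Int))
    (ivd : PySem.Dict Int (List (Int × Int))) : Prop :=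
  (∀ s, scd.get? s = (ivd.get? s).map (fun v => (v.length : Int))) ∧
  (∀ s, WFlst (ivd.getD s [])) ∧
  (∀ s k, k ∈ spd.getD s PySem.Set.empty ↔ covers (ivd.getD s []) k)

def DpInv (N : Int) (nums : List Int) (i j : Int) (dp : List Int) : Prop :=
  dp.length = nums.length ∧
  (∀ t : Int, 0 ≤ t → t < j → PySem.List.pyGetD dp t 0 = pfx nums (t + i + 1) - pfx nums t) ∧
  (∀ t : Int, j ≤ t → t < N - i + 1 → t < (nums.length : Int) →
    PySem.List.pyGetD dp t 0 = pfx nums (t + max i 1) - pfx nums t)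

def PreOK (N : Int) (nums : List Int) (pre : List Int) : Prop :=
  ∀ m : Int, 0 ≤ m → m ≤ N → PySem.List.pyGetD pre m 0 = pfx nums m

theorem wf_starts_mono {lst : List (Int × Int)} (h : WFlst lst) (a b : Nat) (hab : a ≤ b)
    (hb : b < lst.length) : (lst[a]'(Nat.lt_of_le_of_lt hab hb)).1 ≤ (lst[b]'hb).1 := by
  rcases Nat.eq_or_lt_of_le hab with rfl | hlt
  · exact le_refl _
  · exact le_trans (h.2 _ (List.getElem_mem _)) (le_of_lt (h.1 a b hlt hb))

theorem wf_ends_mono {lst : List (Int × Int)} (h : WFlst lst) (a b : Nat) (hab : a ≤ b)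
    (hb : b < lst.length) : (lst[a]'(Nat.lt_of_le_of_lt hab hb)).2 ≤ (lst[b]'hb).2 := by
  rcases Nat.eq_or_lt_of_le hab with rfl | hlt
  · exact le_refl _
  · exact le_trans (le_of_lt (h.1 a b hlt hb)) (h.2 _ (List.getElem_mem _))

theorem bsearchB_spec (lst : List (Int × Int)) (x : Int)
    (hmono : ∀ (a b : Nat) (hab : a ≤ b) (hb : b < lst.length),
      (lst[a]'(Nat.lt_of_le_of_lt hab hb)).1 ≤ (lst[b]'hb).1) :
    ∀ (n : Nat) (lo hi : Int), (hi - lo).toNat = n → 0 ≤ lo → lo ≤ hi → hi ≤ (lst.length : Int) →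
    (∀ (t : Nat) (ht : t < lst.length), (t : Int) < lo → (lst[t]'ht).1 ≤ x) →
    (∀ (t : Nat) (ht : t < lst.length), hi ≤ (t : Int) → x < (lst[t]'ht).1) →
    lo ≤ bsearchB lst x lo hi ∧ bsearchB lst x lo hi ≤ hi ∧
    (∀ (t : Nat) (ht : t < lst.length), (t : Int) < bsearchB lst x lo hi → (lst[t]'ht).1 ≤ x) ∧
    (∀ (t : Nat) (ht : t < lst.length), bsearchB lst x lo hi ≤ (t : Int) → x < (lst[t]'ht).1) := by
  intro n
  induction n using Nat.strong_induction_on with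
  | _ n IH =>
    intro lo hi hn h0 hlh hhl hbelow habove
    by_cases h : lo < hi
    · have hmid := PySem.Int.floordiv_two_mid_bounds (lo := lo) (hi := hi) (le_of_lt h)
      have hmlt : PySem.Int.floordiv (lo + hi) 2 < hi := by
        rw [PySem.Int.floordiv_lt_iff_lt_mul (by omega)]; omega
      set mid := PySem.Int.floordiv (lo + hi) 2 with hmiddef
      have hmn : mid.toNat < lst.length := by omega
      have hget : PySem.List.pyGetD lst mid (0, 0) = lst[mid.toNat]'hmn :=
        PySem.List.pyGetD_eq_getElem lst (0, 0) (by omega) (by omega)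
      rw [bsearchB]
      simp only [dif_pos h, ← hmiddef, hget]
      by_cases hc : (lst[mid.toNat]'hmn).1 ≤ x
      · simp only [if_pos hc]
        have := IH (hi - (mid+1)).toNat (by omega) (mid+1) hi (rfl) (by omega) (by omega) hhl
          (fun t ht hlt => by
            have h2 : t ≤ mid.toNat := by omega
            exact le_trans (hmono t mid.toNat h2 hmn) hc)
          habove
        exact ⟨by omega, this.2.1, this.2.2.1, this.2.2.2⟩
      · simp only [if_neg hc]
        rw [not_le] at hc
        have := IH (mid - lo).toNat (by omega) lo mid (rfl) h0 (by omega) (by omega)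
          hbelow
          (fun t ht hge => by
            have h2 : mid.toNat ≤ t := by omega
            exact lt_of_lt_of_le hc (hmono mid.toNat t h2 ht))
        exact ⟨this.1, by omega, this.2.2.1, this.2.2.2⟩
    · rw [bsearchB]
      simp only [dif_neg h]
      exact ⟨le_refl _, by omega, fun t ht hlt => hbelow t ht hlt, fun t ht hge => habove t ht (by omega)⟩

theorem insert_eq_insertIdx (lst : List (Int × Int)) (lo : Int) (v : Int × Int)
    (h0 : 0 ≤ lo) (hle : lo ≤ (lst.length : Int)) :
    PySem.List.insert lst lo v = lst.insertIdx lo.toNat v := by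
  have h1 : lo = ((lo.toNat : Nat) : Int) := by omega
  rw [h1, PySem.List.insert_natCast lst lo.toNat v (by omega)]
  have : ∀ (l : List (Int × Int)) (n : Nat), n ≤ l.length →
      l.insertIdx n v = l.take n ++ v :: l.drop n := by
    intro l
    induction l with
    | nil => intro n hn; have : n = 0 := by simpa using hn
             subst this; simp [List.insertIdx]
    | cons y t ih => intro n hn; cases n with
      | zero => simp [List.insertIdx]
      | succ n => simp only [List.insertIdx, List.take, List.drop, List.cons_append]
                  exact congrArg (y :: ·) (ih n (by simpa using hn))
  simp only [Int.toNat_natCast]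
  rw [this lst lo.toNat (by omega)]

theorem covers_iff_getElem (lst : List (Int × Int)) (k : Int) :
    covers lst k ↔ ∃ (t : Nat) (ht : t < lst.length), (lst[t]'ht).1 ≤ k ∧ k ≤ (lst[t]'ht).2 := by
  unfold covers
  constructor
  · rintro ⟨p, hp, h1, h2⟩
    obtain ⟨t, ht, rfl⟩ := List.mem_iff_getElem.mp hp
    exact ⟨t, ht, h1, h2⟩
  · rintro ⟨t, ht, h1, h2⟩
    exact ⟨lst[t]'ht, List.getElem_mem _, h1, h2⟩

theorem pure_sim (i j summ m : Int) (hi : 0 ≤ i) (hj : 0 ≤ j)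
    (scd : PySem.Dict Int Int) (spd : PySem.Dict Int (List Int))
    (ivd : PySem.Dict Int (List (Int × Int))) (hrel : RelD scd spd ivd) :
    (pureA i j summ m scd spd).1 = (pureB i j summ m ivd).1 ∧
    RelD (pureA i j summ m scd spd).2.1 (pureA i j summ m scd spd).2.2 (pureB i j summ m ivd).2 := by
  obtain ⟨hcnt, hwf, hmem⟩ := hrel
  have hcontains : scd.contains summ = ivd.contains summ := by
    rw [PySem.Dict.contains_eq_isSome_get?, PySem.Dict.contains_eq_isSome_get?, hcnt summ]
    cases ivd.get? summ <;> rfl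
  by_cases hC : ivd.contains summ = true
  · -- key already present
    have hg : ∃ l0, ivd.get? summ = some l0 := by
      rw [PySem.Dict.contains_eq_isSome_get?] at hC
      cases h : ivd.get? summ
      · rw [h] at hC; simp at hC
      · exact ⟨_, rfl⟩
    obtain ⟨lst, hg⟩ := hg
    have hlst : ivd.getD summ [] = lst := by rw [PySem.Dict.getD_eq_get?_getD, hg]; rfl
    have hwl : WFlst lst := hlst ▸ hwf summ
    have hcount : scd.getD summ 0 = (lst.length : Int) := by
      rw [PySem.Dict.getD_eq_get?_getD, hcnt, hg]; rfl
    have hscont : scd.contains summ = true := by rw [hcontains]; exact hC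
    have hbs := bsearchB_spec lst (j + i) (wf_starts_mono hwl) (lst.length) 0 (lst.length : Int)
      (by omega) (by omega) (by omega) (le_refl _)
      (fun t ht hlt => (by omega : False).elim)
      (fun t ht hge => (by omega : False).elim)
    set lo := bsearchB lst (j + i) 0 (lst.length : Int) with hlodef
    obtain ⟨hlo0, hlolen, P1, P2⟩ := hbs
    set condB := (lo == 0 || decide ((PySem.List.pyGetD lst (lo - 1) (0, 0)).2 < j)) with hconddef
    have hpyl : ∀ (h : 0 < lo),
        PySem.List.pyGetD lst (lo - 1) (0, 0) = lst[(lo - 1).toNat]'(by omega) :=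
      fun h => PySem.List.pyGetD_eq_getElem lst (0, 0) (by omega) (by omega)
    have hcond_iff : condB = true ↔ ¬ (∃ k, j ≤ k ∧ k < j + i + 1 ∧ covers lst k) := by
      constructor
      · intro hcd ⟨k, hk1, hk2, hkc⟩
        obtain ⟨t, ht, hp1, hp2⟩ := (covers_iff_getElem lst k).mp hkc
        have htlo : (t : Int) < lo := by
          by_contra hge
          rw [not_lt] at hge
          exact absurd (le_trans hp1 (by omega)) (not_le.mpr (P2 t ht hge))
        rw [hconddef] at hcd
        rcases Bool.or_eq_true_iff.mp hcd with h0 | hend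
        · have : lo = 0 := by simpa using h0
          omega
        · have hend' := of_decide_eq_true hend
          rw [hpyl (by omega)] at hend'
          have := wf_ends_mono hwl t (lo - 1).toNat (by omega) (by omega)
          omega
      · intro hno
        by_contra hcf
        rw [hconddef] at hcf
        have h0 : ¬ (lo = 0) := fun h => by simp [h] at hcf
        have hend : ¬ ((PySem.List.pyGetD lst (lo - 1) (0, 0)).2 < j) := fun h => by
          simp [h] at hcf
        rw [hpyl (by omega)] at hend
        rw [not_lt] at hend
        apply hno
        refine ⟨max j (lst[(lo - 1).toNat]'(by omega)).1, le_max_left _ _, ?_, ?_⟩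
        · have := P1 (lo - 1).toNat (by omega) (by omega)
          omega
        · rw [covers_iff_getElem]
          refine ⟨(lo - 1).toNat, by omega, le_max_right _ _, ?_⟩
          have := hwl.2 _ (List.getElem_mem (l := lst) (n := (lo - 1).toNat) (h := by omega))
          omega
    have hex_iff : ((PySem.List.pyRange j (j + i + 1) 1).any
        (fun k => PySem.Set.contains (spd.getD summ PySem.Set.empty) k)) = true ↔
        (∃ k, j ≤ k ∧ k < j + i + 1 ∧ covers lst k) := by
      rw [List.any_eq_true]
      constructor
      · rintro ⟨k, hkr, hkc⟩
        rw [PySem.List.mem_pyRange_one] at hkr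
        exact ⟨k, hkr.1, hkr.2, (hlst ▸ hmem summ k).mp ((PySem.Set.contains_iff _ _).mp hkc)⟩
      · rintro ⟨k, h1, h2, hc⟩
        exact ⟨k, PySem.List.mem_pyRange_one.mpr ⟨h1, h2⟩,
          (PySem.Set.contains_iff _ _).mpr ((hlst ▸ hmem summ k).mpr hc)⟩
    by_cases hov : (∃ k, j ≤ k ∧ k < j + i + 1 ∧ covers lst k)
    · -- overlap: both sides leave everything unchanged
      have hex : ((PySem.List.pyRange j (j + i + 1) 1).any
          (fun k => PySem.Set.contains (spd.getD summ PySem.Set.empty) k)) = true := hex_iff.mpr hov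
      have hcondf : condB = false := by
        cases hcb : condB
        · rfl
        · exact absurd hov (hcond_iff.mp hcb)
      have hA : pureA i j summ m scd spd = (m, scd, spd) := by
        simp only [pureA, hscont, hex, if_pos]
      have hB : pureB i j summ m ivd = (m, ivd) := by
        simp only [pureB, hlst, ← hlodef, ← hconddef, hcondf, Bool.false_eq_true, if_false]
      rw [hA, hB]
      exact ⟨rfl, hcnt, hwf, hmem⟩
    · -- no overlap: both sides record the new interval
      have hex : ((PySem.List.pyRange j (j + i + 1) 1).any
          (fun k => PySem.Set.contains (spd.getD summ PySem.Set.empty) k)) = false := by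
        cases hany : ((PySem.List.pyRange j (j + i + 1) 1).any
          (fun k => PySem.Set.contains (spd.getD summ PySem.Set.empty) k))
        · rfl
        · exact absurd (hex_iff.mp hany) hov
      have hcondt : condB = true := hcond_iff.mpr hov
      have hins : PySem.List.insert lst lo (j, j + i) = lst.insertIdx lo.toNat (j, j + i) :=
        insert_eq_insertIdx lst lo (j, j + i) hlo0 hlolen
      set lst2 := lst.insertIdx lo.toNat (j, j + i) with hlst2def
      have hlolen' : lo.toNat ≤ lst.length := by omega
      have hlen2 : lst2.length = lst.length + 1 := by
        rw [hlst2def, List.length_insertIdx, if_pos hlolen']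
      have hEnds : ∀ (t : Nat) (ht : t < lst.length), (t : Int) < lo → (lst[t]'ht).2 < j := by
        intro t ht htlo
        rcases Bool.or_eq_true_iff.mp hcondt with h0 | hend
        · have : lo = 0 := by simpa using h0
          omega
        · have hend' := of_decide_eq_true hend
          rw [hpyl (by omega)] at hend'
          have := wf_ends_mono hwl t (lo - 1).toNat (by omega) (by omega)
          omega
      have hStarts : ∀ (t : Nat) (ht : t < lst.length), lo ≤ (t : Int) → j + i < (lst[t]'ht).1 :=
        P2
      have hget2a : ∀ (t : Nat) (h : t < lo.toNat),
          lst2[t]'(by omega) = lst[t]'(by omega) := by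
        intro t h
        exact List.getElem_insertIdx_of_lt h _
      have hget2b : lst2[lo.toNat]'(hlen2 ▸ (by omega : lo.toNat < lst.length + 1)) = (j, j + i) := by
        exact List.getElem_insertIdx_self (by rw [← hlst2def, hlen2]; omega)
      have hget2c : ∀ (t : Nat) (h1 : lo.toNat < t) (ht : t < lst2.length),
          lst2[t]'ht = lst[t - 1]'(by omega) := by
        intro t h1 ht
        have : lst2[t]'ht = (lst.insertIdx lo.toNat (j, j + i))[t]'(hlst2def ▸ ht) := rfl
        rw [this, List.getElem_insertIdx, dif_neg (by omega), dif_neg (by omega)]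
      have hwf2 : WFlst lst2 := by
        constructor
        · intro a b hab hb
          by_cases hao : a < lo.toNat
          · by_cases hbo : b < lo.toNat
            · rw [hget2a a hao, hget2a b hbo]
              exact hwl.1 a b hab (by omega)
            · by_cases hbe : b = lo.toNat
              · subst hbe
                rw [hget2a a hao, hget2b]
                have := hEnds a (by omega) (by omega)
                omega
              · rw [hget2a a hao, hget2c b (by omega) hb]
                exact hwl.1 a (b - 1) (by omega) (by omega)
          · have hae : lo.toNat ≤ a := by omega
            by_cases hao2 : a = lo.toNat
            · subst hao2
              rw [hget2b, hget2c b (by omega) hb]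
              have := hStarts (b - 1) (by omega) (by omega)
              simpa using this
            · rw [hget2c a (by omega) (by omega), hget2c b (by omega) hb]
              exact hwl.1 (a - 1) (b - 1) (by omega) (by omega)
        · intro p hp
          rcases (List.mem_insertIdx hlolen').mp (hlst2def ▸ hp) with h | h
          · subst h; simp; omega
          · exact hwl.2 p h
      have hA : pureA i j summ m scd spd =
          (max m ((lst.length : Int) + 1), scd.insert summ ((lst.length : Int) + 1),
            spd.insert summ ((PySem.List.pyRange j (j + i + 1) 1).foldl
              (fun p k => PySem.Set.add p k) (spd.getD summ PySem.Set.empty))) := by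
        simp only [pureA, hscont, hex, Bool.false_eq_true, if_false, if_true, hcount]
      have hB : pureB i j summ m ivd =
          (if ((lst2.length : Int)) > m then (lst2.length : Int) else m, ivd.insert summ lst2) := by
        simp only [pureB, hlst, ← hlodef, ← hconddef, hcondt, if_true, hins]
      rw [hA, hB]
      refine ⟨by rw [hlen2]; push_cast; omega, ?_, ?_, ?_⟩
      · intro s
        rw [PySem.Dict.get?_insert, PySem.Dict.get?_insert]
        by_cases hs : s = summ
        · simp only [if_pos hs, Option.map_some, hlen2]
          push_cast
          rfl
        · simp only [if_neg hs]
          exact hcnt s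
      · intro s
        rw [PySem.Dict.getD_insert]
        by_cases hs : s = summ
        · simpa only [if_pos hs] using hwf2
        · simp only [if_neg hs]
          exact hwf s
      · intro s k
        rw [PySem.Dict.getD_insert, PySem.Dict.getD_insert]
        by_cases hs : s = summ
        · simp only [if_pos hs]
          have hmem' := hmem summ k
          rw [hlst] at hmem'
          have hupd : (PySem.List.pyRange j (j + i + 1) 1).foldl
              (fun p k => PySem.Set.add p k) (spd.getD summ PySem.Set.empty) =
              PySem.Set.update (spd.getD summ PySem.Set.empty)
                (PySem.List.pyRange j (j + i + 1) 1) := rfl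
          rw [hupd, PySem.Set.mem_update, PySem.List.mem_pyRange_one, hmem']
          constructor
          · rintro (hc | hr)
            · obtain ⟨p, hp, h1, h2⟩ := hc
              exact ⟨p, (List.mem_insertIdx hlolen').mpr (Or.inr hp), h1, h2⟩
            · exact ⟨(j, j + i), (List.mem_insertIdx hlolen').mpr (Or.inl rfl), by simpa using hr.1,
                by simp; omega⟩
          · rintro ⟨p, hp, h1, h2⟩
            rcases (List.mem_insertIdx hlolen').mp hp with h | h
            · subst h
              right
              constructor
              · simpa using h1
              · simp at h2; omega
            · exact Or.inl ⟨p, h, h1, h2⟩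
        · simp only [if_neg hs]
          exact hmem s k
  · -- fresh sum value
    have hgn : ivd.get? summ = none := by
      rw [PySem.Dict.contains_eq_isSome_get?] at hC
      cases h : ivd.get? summ
      · rfl
      · rw [h] at hC; simp at hC
    have hlst : ivd.getD summ [] = [] := by rw [PySem.Dict.getD_eq_get?_getD, hgn]; rfl
    have hscont : scd.contains summ = false := by
      rw [hcontains]
      simpa using hC
    have hlo : bsearchB ([] : List (Int × Int)) (j + i) 0 0 = 0 := by
      rw [bsearchB]; simp
    have hcontains_empty : ∀ k : Int,
        PySem.Set.contains (PySem.Set.empty : PySem.Set Int) k = false := by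
      intro k
      cases h : PySem.Set.contains (PySem.Set.empty : PySem.Set Int) k
      · rfl
      · have := (PySem.Set.contains_iff _ _).mp h
        rw [PySem.Set.empty_eq] at this
        simp at this
    have hA : pureA i j summ m scd spd =
        (max m 1, scd.insert summ 1,
          spd.insert summ ((PySem.List.pyRange j (j + i + 1) 1).foldl
            (fun p k => PySem.Set.add p k) PySem.Set.empty)) := by
      simp only [pureA, hscont, Bool.false_eq_true, if_false]
      rw [PySem.Dict.getD_insert_self]
      have hany : ((PySem.List.pyRange j (j + i + 1) 1).any
          (fun k => PySem.Set.contains (PySem.Set.empty : PySem.Set Int) k)) = false := by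
        rw [List.any_eq_false]
        intro k _
        rw [hcontains_empty k]
        simp
      rw [hany]
      simp only [Bool.false_eq_true, if_false, PySem.Dict.getD_insert_self,
        PySem.Dict.insert_insert_self]
      norm_num
    have hB : pureB i j summ m ivd =
        (if (1 : Int) > m then 1 else m, ivd.insert summ [(j, j + i)]) := by
      simp only [pureB, hlst, List.length_nil, Nat.cast_zero, hlo]
      simp only [PySem.List.insert_zero, beq_self_eq_true, Bool.true_or, if_true,
        List.length_cons, List.length_nil]
      norm_num
    rw [hA, hB]
    refine ⟨by omega, ?_, ?_, ?_⟩
    · intro s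
      rw [PySem.Dict.get?_insert, PySem.Dict.get?_insert]
      by_cases hs : s = summ
      · simp [hs]
      · simp only [if_neg hs]
        exact hcnt s
    · intro s
      rw [PySem.Dict.getD_insert]
      by_cases hs : s = summ
      · simp only [if_pos hs]
        constructor
        · intro a b hab hb
          simp at hb
          omega
        · intro p hp
          simp at hp
          subst hp
          simp
          omega
      · simp only [if_neg hs]
        exact hwf s
    · intro s k
      rw [PySem.Dict.getD_insert, PySem.Dict.getD_insert]
      by_cases hs : s = summ
      · simp only [if_pos hs]
        have hupd : (PySem.List.pyRange j (j + i + 1) 1).foldl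
            (fun p k => PySem.Set.add p k) (PySem.Set.empty : PySem.Set Int) =
            PySem.Set.update PySem.Set.empty (PySem.List.pyRange j (j + i + 1) 1) := rfl
        rw [hupd, PySem.Set.mem_update, PySem.List.mem_pyRange_one, PySem.Set.empty_eq]
        unfold covers
        simp
      · simp only [if_neg hs]
        exact hmem s k

theorem pyGetD_pySetD_self (xs : List Int) (v : Int) (t : Int) (h0 : 0 ≤ t)
    (hl : t < (xs.length : Int)) :
    PySem.List.pyGetD (PySem.List.pySetD xs t v) t 0 = v := by
  have h1 : t = ((t.toNat : Nat) : Int) := by omega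
  rw [h1, PySem.List.pyGetD_pySetD_natCast xs t.toNat t.toNat v 0 (by omega), if_pos rfl]

theorem pyGetD_pySetD_other (xs : List Int) (v : Int) (t u : Int) (h0 : 0 ≤ t) (hu : 0 ≤ u)
    (hl : t < (xs.length : Int)) (hne : u ≠ t) :
    PySem.List.pyGetD (PySem.List.pySetD xs t v) u 0 = PySem.List.pyGetD xs u 0 := by
  have h1 : t = ((t.toNat : Nat) : Int) := by omega
  have h2 : u = ((u.toNat : Nat) : Int) := by omega
  rw [h1, h2, PySem.List.pyGetD_pySetD_natCast xs t.toNat u.toNat v 0 (by omega),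
    if_neg (by omega)]

theorem pfx_succ (nums : List Int) (t : Int) (h0 : 0 ≤ t) (hl : t < (nums.length : Int)) :
    pfx nums (t + 1) = pfx nums t + PySem.List.pyGetD nums t 0 := by
  unfold pfx
  rw [PySem.List.pyGetD_eq_getElem nums 0 h0 hl]
  have h1 : (t + 1).toNat = t.toNat + 1 := by omega
  rw [h1, List.sum_take_succ nums t.toNat (by omega)]

theorem getD_nums (nums : List Int) (t : Int) (h0 : 0 ≤ t) (hl : t < (nums.length : Int)) :
    PySem.List.pyGetD nums t 0 = pfx nums (t + 1) - pfx nums t := by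
  rw [pfx_succ nums t h0 hl]; ring

theorem inner_sim (N : Int) (nums : List Int) (hlen : N ≤ (nums.length : Int))
    (pre : List Int) (hpre : PreOK N nums pre) (i : Int) (hi0 : 0 ≤ i) (hiN : i < N) :
    ∀ (cnt : Nat) (j : Int), 0 ≤ j → j + cnt = N - i →
    ∀ (m : Int) (scd : PySem.Dict Int Int) (spd : PySem.Dict Int (List Int))
      (ivd : PySem.Dict Int (List (Int × Int))) (dp : List Int),
      RelD scd spd ivd → DpInv N nums i j dp →
    (((PySem.List.pyRange j (N - i) 1).foldl (stepA nums i) (m, scd, spd, dp)).1 =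
        ((PySem.List.pyRange j (N - i) 1).foldl (stepB pre i) (m, ivd)).1 ∧
      RelD ((PySem.List.pyRange j (N - i) 1).foldl (stepA nums i) (m, scd, spd, dp)).2.1
        ((PySem.List.pyRange j (N - i) 1).foldl (stepA nums i) (m, scd, spd, dp)).2.2.1
        ((PySem.List.pyRange j (N - i) 1).foldl (stepB pre i) (m, ivd)).2 ∧
      DpInv N nums i (N - i)
        ((PySem.List.pyRange j (N - i) 1).foldl (stepA nums i) (m, scd, spd, dp)).2.2.2) := by
  intro cnt
  induction cnt with
  | zero =>
    intro j hj0 hjend m scd spd ivd dp hrel hdp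
    have hji : j = N - i := by omega
    subst hji
    rw [PySem.List.pyRange_one_eq_nil (le_refl _)]
    exact ⟨rfl, hrel, hdp⟩
  | succ cnt ih =>
    intro j hj0 hjend m scd spd ivd dp hrel hdp
    have hjlt : j < N - i := by omega
    have hjlen : j < (nums.length : Int) := by omega
    obtain ⟨hdpl, hdone, htodo⟩ := hdp
    rw [PySem.List.pyRange_one_cons hjlt]
    simp only [List.foldl_cons]
    -- the updated dp and the window sum
    set dp2 := if i > 0 then
        PySem.List.pySetD dp j (PySem.List.pyGetD dp j 0 + PySem.List.pyGetD nums (j + i) 0)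
      else dp with hdp2def
    have hS : PySem.List.pyGetD dp2 j 0 = pfx nums (j + i + 1) - pfx nums j := by
      by_cases hip : i > 0
      · have hv : PySem.List.pyGetD dp j 0 + PySem.List.pyGetD nums (j + i) 0 =
            pfx nums (j + i + 1) - pfx nums j := by
          have h1 := htodo j (le_refl _) (by omega) (by omega)
          rw [show (max i 1) = i from by omega] at h1
          have h2 := getD_nums nums (j + i) (by omega) (by omega)
          rw [h1, h2]
          ring
        rw [hdp2def, if_pos hip, pyGetD_pySetD_self dp _ j hj0 (by omega), hv]
      · have hi00 : i = 0 := by omega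
        have h1 := htodo j (le_refl _) (by omega) (by omega)
        rw [hdp2def, if_neg hip, h1, hi00]
        norm_num
    have hdp2 : DpInv N nums i (j + 1) dp2 := by
      refine ⟨?_, ?_, ?_⟩
      · by_cases hip : i > 0
        · rw [hdp2def, if_pos hip, PySem.List.length_pySetD, hdpl]
        · rw [hdp2def, if_neg hip]; exact hdpl
      · intro t ht0 htj
        by_cases htj2 : t < j
        · have hother : PySem.List.pyGetD dp2 t 0 = PySem.List.pyGetD dp t 0 := by
            by_cases hip : i > 0
            · rw [hdp2def, if_pos hip]
              exact pyGetD_pySetD_other dp _ j t hj0 ht0 (by omega) (by omega)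
            · rw [hdp2def, if_neg hip]
          rw [hother]
          exact hdone t ht0 htj2
        · have : t = j := by omega
          subst this
          exact hS
      · intro t htj htN htlen
        have hother : PySem.List.pyGetD dp2 t 0 = PySem.List.pyGetD dp t 0 := by
          by_cases hip : i > 0
          · rw [hdp2def, if_pos hip]
            exact pyGetD_pySetD_other dp _ j t hj0 (by omega) (by omega) (by omega)
          · rw [hdp2def, if_neg hip]
        rw [hother]
        exact htodo t (by omega) htN htlen
    -- both steps are the pure updates on the same sum value
    have hstepA : stepA nums i (m, scd, spd, dp) j =
        ((pureA i j (pfx nums (j + i + 1) - pfx nums j) m scd spd).1,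
         (pureA i j (pfx nums (j + i + 1) - pfx nums j) m scd spd).2.1,
         (pureA i j (pfx nums (j + i + 1) - pfx nums j) m scd spd).2.2, dp2) := by
      show (let dp2' := if i > 0 then
          PySem.List.pySetD dp j (PySem.List.pyGetD dp j 0 + PySem.List.pyGetD nums (j + i) 0)
        else dp
        let summ := PySem.List.pyGetD dp2' j 0
        let r := pureA i j summ m scd spd
        (r.1, r.2.1, r.2.2, dp2')) = _
      rw [show (let dp2' := if i > 0 then
          PySem.List.pySetD dp j (PySem.List.pyGetD dp j 0 + PySem.List.pyGetD nums (j + i) 0)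
        else dp
        let summ := PySem.List.pyGetD dp2' j 0
        let r := pureA i j summ m scd spd
        (r.1, r.2.1, r.2.2, dp2')) =
        (let summ := PySem.List.pyGetD dp2 j 0
         let r := pureA i j summ m scd spd
         (r.1, r.2.1, r.2.2, dp2)) from rfl]
      rw [hS]
    have hstepB : stepB pre i (m, ivd) j =
        pureB i j (pfx nums (j + i + 1) - pfx nums j) m ivd := by
      show pureB i j (PySem.List.pyGetD pre (j + i + 1) 0 - PySem.List.pyGetD pre j 0) m ivd = _
      rw [hpre (j + i + 1) (by omega) (by omega), hpre j (by omega) (by omega)]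
    have hps := pure_sim i j (pfx nums (j + i + 1) - pfx nums j) m hi0 hj0 scd spd ivd hrel
    have hBeta : pureB i j (pfx nums (j + i + 1) - pfx nums j) m ivd =
        ((pureA i j (pfx nums (j + i + 1) - pfx nums j) m scd spd).1,
         (pureB i j (pfx nums (j + i + 1) - pfx nums j) m ivd).2) := by
      rw [hps.1]
    rw [hstepA, hstepB, hBeta]
    exact ih (j + 1) (by omega) (by omega) _ _ _ _ _ hps.2 hdp2

theorem dpinv_roll (N : Int) (nums : List Int) (i : Int) (dp : List Int) (hi0 : 0 ≤ i)
    (h : DpInv N nums i (N - i) dp) : DpInv N nums (i + 1) 0 dp := by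
  obtain ⟨h1, h2, h3⟩ := h
  refine ⟨h1, ?_, ?_⟩
  · intro t ht0 htneg
    omega
  · intro t ht0 htN htlen
    have := h2 t ht0 (by omega)
    rw [show (max (i + 1) 1) = i + 1 from by omega]
    rw [show t + (i + 1) = t + i + 1 from by ring]
    exact this

theorem outer_sim (N : Int) (nums : List Int) (hlen : N ≤ (nums.length : Int))
    (pre : List Int) (hpre : PreOK N nums pre) :
    ∀ (cnt : Nat) (i : Int), 0 ≤ i → i + cnt = N →
    ∀ (m : Int) (scd : PySem.Dict Int Int) (spd : PySem.Dict Int (List Int))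
      (ivd : PySem.Dict Int (List (Int × Int))) (dp : List Int),
      RelD scd spd ivd → DpInv N nums i 0 dp →
    ((PySem.List.pyRange i N 1).foldl
        (fun st ii => (PySem.List.pyRange 0 (N - ii) 1).foldl (stepA nums ii) st)
        (m, scd, spd, dp)).1 =
      ((PySem.List.pyRange i N 1).foldl
        (fun st ii => (PySem.List.pyRange 0 (N - ii) 1).foldl (stepB pre ii) st)
        (m, ivd)).1 := by
  intro cnt
  induction cnt with
  | zero =>
    intro i hi0 hiend m scd spd ivd dp hrel hdp
    have : i = N := by omega
    subst this
    rw [PySem.List.pyRange_one_eq_nil (le_refl _)]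
    simp only [List.foldl_nil]
  | succ cnt ih =>
    intro i hi0 hiend m scd spd ivd dp hrel hdp
    have hilt : i < N := by omega
    rw [PySem.List.pyRange_one_cons hilt]
    simp only [List.foldl_cons]
    have hin := inner_sim N nums hlen pre hpre i hi0 hilt (N - i).toNat 0 (le_refl _)
      (by omega) m scd spd ivd dp hrel hdp
    set stA := (PySem.List.pyRange 0 (N - i) 1).foldl (stepA nums i) (m, scd, spd, dp) with hstA
    set stB := (PySem.List.pyRange 0 (N - i) 1).foldl (stepB pre i) (m, ivd) with hstB
    have hA4 : stA = (stA.1, stA.2.1, stA.2.2.1, stA.2.2.2) := rfl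
    have hB2 : stB = (stA.1, stB.2) := by
      rw [hin.1]
    rw [hA4, hB2]
    exact ih (i + 1) (by omega) (by omega) stA.1 stA.2.1 stA.2.2.1 stB.2 stA.2.2.2
      hin.2.1 (dpinv_roll N nums i stA.2.2.2 hi0 hin.2.2)

theorem foldl_pre (l : List Int) : ∀ (acc : List Int) (r : Int),
    (l.foldl (fun (p : List Int × Int) x => (p.1 ++ [p.2 + x], p.2 + x)) (acc, r)).1 =
      acc ++ (List.range l.length).map (fun k => r + (l.take (k + 1)).sum) := by
  induction l with
  | nil => intro acc r; simp
  | cons x t ih =>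
    intro acc r
    simp only [List.foldl_cons]
    rw [ih (acc ++ [r + x]) (r + x), List.length_cons, List.range_succ_eq_map,
      List.map_cons, List.map_map, List.append_assoc, List.singleton_append]
    congr 1
    congr 1
    · simp
    · apply List.map_congr_left
      intro k hk
      simp only [Function.comp_apply, List.take_succ_cons, List.sum_cons]
      ring

theorem relD_init : RelD PySem.Dict.empty PySem.Dict.empty PySem.Dict.empty := by
  refine ⟨?_, ?_, ?_⟩
  · intro s
    rw [PySem.Dict.get?_empty, PySem.Dict.get?_empty]
    rfl
  · intro s
    rw [PySem.Dict.getD_empty]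
    constructor
    · intro a b hab hb
      simp at hb
    · intro p hp
      simp at hp
  · intro s k
    rw [PySem.Dict.getD_empty, PySem.Dict.getD_empty, PySem.Set.empty_eq]
    unfold covers
    simp

theorem dpinv_init (N : Int) (nums : List Int) (hlen : N ≤ (nums.length : Int)) :
    DpInv N nums 0 0 nums := by
  refine ⟨rfl, ?_, ?_⟩
  · intro t ht0 htneg
    omega
  · intro t ht0 htN htlen
    rw [show (max (0 : Int) 1) = 1 from by norm_num]
    exact getD_nums nums t ht0 htlen

theorem pre_char (N : Int) (nums : List Int) (h0 : 0 ≤ N) (hlen : N ≤ (nums.length : Int)) :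
    PreOK N nums ((PySem.List.slice nums none (some N)).foldl
      (fun (p : List Int × Int) x => (p.1 ++ [p.2 + x], p.2 + x)) ([0], 0)).1 := by
  rw [PySem.List.slice_to nums h0]
  set l := nums.take N.toNat with hl
  have hll : l.length = N.toNat := by rw [hl, List.length_take]; omega
  rw [foldl_pre l [0] 0]
  have hmap : [(0 : Int)] ++ (List.range l.length).map (fun k => 0 + (l.take (k + 1)).sum)
      = (List.range (l.length + 1)).map (fun k => (l.take k).sum) := by
    rw [List.range_succ_eq_map, List.map_cons, List.map_map, List.singleton_append]
    congr 1
    · simp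
  rw [hmap]
  intro mm hm0 hmN
  rw [show mm = ((mm.toNat : Nat) : Int) from by omega, PySem.List.pyGetD_natCast]
  rw [PySem.List.getD_map_range _ _ _ _ (by omega)]
  unfold pfx
  rw [hl, List.take_take]
  congr 2
  omega

theorem main_equiv (N : Int) (nums : List Int) (hpre : N ≤ (nums.length : Int)) :
    solve_method N nums = solve_method_alt N nums := by
  by_cases hN : 0 ≤ N
  · exact outer_sim N nums hpre _ (pre_char N nums hN hpre) N.toNat 0 (le_refl _) (by omega)
      0 PySem.Dict.empty PySem.Dict.empty PySem.Dict.empty nums relD_init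
      (dpinv_init N nums hpre)
  · have h1 : PySem.List.pyRange 0 N 1 = [] := PySem.List.pyRange_one_eq_nil (by omega)
    unfold solve_method solve_method_alt
    simp only [h1, List.foldl_nil]

-- ===== VERDICT (by name: the statement is the Claim_ definition above) =====
theorem solve_method_spec : Claim_equal_solve_method := by
  intro N nums _hdom hpre
  exact main_equiv N nums hpre
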